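-- pv_equiv track=rewrite | github.com/sshreya99/Interview-OA | Prep/Amazon OAs/OA3.py | countTrips
-- ===== SOURCE A (Python) =====
-- def countTrips(package_weight):
--     dic = {}
--     total = 0
--
--     for i in package_weight:
--         if i in dic:
--             dic[i] = dic[i]+1
--         else:
--             dic[i] = 1
--
--     for i in dic:
--         if dic[i] % 3 == 0:
--             total = total + dic[i] // 3
--         elif dic[i] % 2 == 0:
--             total = total + dic[i] // 2
--
--     return total
-- ===== SOURCE B (Python) =====
-- def countTrips(package_weight):
--     s = sorted(package_weight)
--     n = len(s)
--     total = 0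
--     i = 0
--     while i < n:
--         j = i + 1
--         while j < n and s[j] == s[i]:
--             j += 1
--         c = j - i
--         if c % 3 == 0:
--             total += c // 3
--         elif c % 2 == 0:
--             total += c // 2
--         i = j
--     return total
-- ===== Notes on version B (the rewrite author's own statement) =====
-- stated objective: alternative
-- what changed: Replaces the hash-table frequency dict with sorting and a single scan grouping maximal runs of equal weights, adding c//3 or c//2 per run length c.
import Mathlib
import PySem

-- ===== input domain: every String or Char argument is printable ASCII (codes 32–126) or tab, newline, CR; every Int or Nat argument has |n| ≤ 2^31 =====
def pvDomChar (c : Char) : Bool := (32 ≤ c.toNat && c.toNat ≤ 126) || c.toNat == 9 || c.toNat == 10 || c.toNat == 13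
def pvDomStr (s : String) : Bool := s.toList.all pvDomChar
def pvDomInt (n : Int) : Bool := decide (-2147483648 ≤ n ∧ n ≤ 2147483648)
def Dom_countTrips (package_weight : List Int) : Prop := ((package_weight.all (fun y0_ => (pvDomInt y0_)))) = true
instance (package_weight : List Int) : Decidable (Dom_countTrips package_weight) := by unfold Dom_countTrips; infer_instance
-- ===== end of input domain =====

-- B replaces A's frequency dict with sort + one scan over maximal runs of equal weights (alternative decomposition, not claimed faster).

-- ===== PORT A =====
def countTrips (package_weight : List Int) : Int :=
  let dic := package_weight.foldl
    (fun d i => if d.contains i then d.insert i (d.getD i 0 + 1) else d.insert i 1)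
    PySem.Dict.empty
  dic.keys.foldl
    (fun total i =>
      if PySem.Int.mod (dic.getD i 0) 3 = 0 then total + PySem.Int.floordiv (dic.getD i 0) 3
      else if PySem.Int.mod (dic.getD i 0) 2 = 0 then total + PySem.Int.floordiv (dic.getD i 0) 2
      else total)
    0

-- ===== PORT B =====
-- trips for one run of length c (A's two-branch if/elif, else contributes 0)
def tripsOfRun (c : Int) : Int :=
  if PySem.Int.mod c 3 = 0 then PySem.Int.floordiv c 3
  else if PySem.Int.mod c 2 = 0 then PySem.Int.floordiv c 2
  else 0

-- the scan of Source B: peel one maximal run of equal values off the front of the sorted list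
def runScan : List Int → Int
  | [] => 0
  | h :: t =>
      tripsOfRun ((t.takeWhile (· == h)).length + 1) + runScan (t.dropWhile (· == h))
termination_by l => l.length
decreasing_by
  simp only [List.length_cons]
  exact Nat.lt_succ_of_le (List.length_dropWhile_le _ _)

def countTrips_alt (package_weight : List Int) : Int :=
  runScan (PySem.List.sorted package_weight (fun x => x) false)

-- ===== PRECONDITION & SPEC =====
def Spec_countTrips (package_weight : List Int) (out : Int) : Prop := out = countTrips_alt package_weight
instance (package_weight : List Int) (out : Int) : Decidable (Spec_countTrips package_weight out) := by unfold Spec_countTrips; infer_instance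

-- ===== CLAIM (what is proved, stated in full; the proofs are below) =====
def Claim_equal_countTrips : Prop := ∀ (package_weight : List Int), Dom_countTrips package_weight → Spec_countTrips package_weight (countTrips package_weight)

-- ===== LEMMAS AND PROOFS =====

-- A's value as a sum of tripsOfRun over the distinct elements
theorem countTrips_eq_sum (xs : List Int) :
    countTrips xs = ((PySem.Set.ofList xs).map (fun v => tripsOfRun (xs.count v : Int))).sum := by
  have hfun : (fun (d : PySem.Dict Int Int) i =>
        if d.contains i then d.insert i (d.getD i 0 + 1) else d.insert i 1)
      = (fun (d : PySem.Dict Int Int) i => d.insert i (d.getD i 0 + 1)) := by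
    funext d i
    by_cases h : d.contains i
    · simp [h]
    · have h0 : d.getD i 0 = 0 := by
        apply PySem.Dict.getD_of_not_contains
        simpa using h
      simp [h, h0]
  simp only [countTrips]
  rw [hfun, PySem.Dict.foldl_insert_getD_add_one_eq_counter, PySem.Dict.keys_counter]
  have hstep : (fun (total i : Int) =>
        if PySem.Int.mod ((PySem.Dict.counter xs).getD i 0) 3 = 0 then
          total + PySem.Int.floordiv ((PySem.Dict.counter xs).getD i 0) 3
        else if PySem.Int.mod ((PySem.Dict.counter xs).getD i 0) 2 = 0 then
          total + PySem.Int.floordiv ((PySem.Dict.counter xs).getD i 0) 2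
        else total)
      = (fun (total i : Int) => total + tripsOfRun (xs.count i : Int)) := by
    funext total i
    rw [tripsOfRun, PySem.Dict.getD_counter]
    split_ifs <;> ring
  rw [hstep, PySem.List.foldl_add]
  simp

-- B's scan on a sorted list is the same sum over its distinct elements
theorem runScan_eq_sum : ∀ (n : ℕ) (l : List Int), l.length ≤ n → l.Pairwise (· ≤ ·) →
    runScan l = ((PySem.Set.ofList l).map (fun v => tripsOfRun (l.count v : Int))).sum := by
  intro n
  induction n with
  | zero =>
    intro l hl _
    have hnil : l = [] := List.eq_nil_of_length_eq_zero (Nat.le_zero.mp hl)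
    simp [hnil, runScan]
  | succ n ih =>
    intro l hl hp
    match l with
    | [] => simp [runScan]
    | h :: t =>
      have hpc := List.pairwise_cons.mp hp
      have hle : ∀ y ∈ t, h ≤ y := hpc.1
      have hpt : t.Pairwise (· ≤ ·) := hpc.2
      have ht : t.takeWhile (· == h) ++ t.dropWhile (· == h) = t := List.takeWhile_append_dropWhile
      have h1 : ∀ x ∈ t.takeWhile (· == h), x = h := by
        intro x hx
        simpa using List.mem_takeWhile_imp hx
      have hpt2 : (t.dropWhile (· == h)).Pairwise (· ≤ ·) :=
        hpt.sublist (List.dropWhile_sublist _)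
      have h2 : h ∉ t.dropWhile (· == h) := by
        intro hmem
        cases hd2 : t.dropWhile (· == h) with
        | nil => rw [hd2] at hmem; exact absurd hmem (List.not_mem_nil)
        | cons a r =>
          have hane : a ≠ h := by
            have h0 : 0 < (t.dropWhile (· == h)).length := by rw [hd2]; simp
            have := List.dropWhile_get_zero_not (· == h) t h0
            rw [List.get_eq_getElem] at this
            simpa [hd2] using this
          rw [hd2] at hmem
          rcases List.mem_cons.mp hmem with hcase | hcase
          · exact hane hcase.symm
          · -- a ≤ h from sortedness of the dropped suffix; h ≤ a since a ∈ t
            have hah : a ≤ h := by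
              have := (List.pairwise_cons.mp (hd2 ▸ hpt2)).1
              exact this h hcase
            have hha : h ≤ a := by
              apply hle
              have : a ∈ t.dropWhile (· == h) := by rw [hd2]; exact List.mem_cons_self
              exact List.Sublist.mem this (List.dropWhile_sublist _)
            exact hane (le_antisymm hah hha)
      have hcnt1 : (t.takeWhile (· == h)).count h = (t.takeWhile (· == h)).length := by
        rw [List.count_eq_length]
        intro b hb
        exact (h1 b hb).symm
      have hcnth : (h :: t).count h = (t.takeWhile (· == h)).length + 1 := by
        have htc : List.count h t = (t.takeWhile (· == h)).length := by
          conv_lhs => rw [← ht]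
          rw [List.count_append, hcnt1, List.count_eq_zero.mpr h2]
          omega
        simp [htc]
      have hcntv : ∀ v ∈ PySem.Set.ofList (t.dropWhile (· == h)),
          (h :: t).count v = (t.dropWhile (· == h)).count v := by
        intro v hv
        have hvmem : v ∈ t.dropWhile (· == h) := (PySem.Set.mem_ofList _ _).mp hv
        have hvne : v ≠ h := by rintro rfl; exact h2 hvmem
        have hv1 : (t.takeWhile (· == h)).count v = 0 := by
          rw [List.count_eq_zero]
          intro hvx
          exact hvne (h1 v hvx)
        have hv0 : List.count v t = List.count v (t.dropWhile (· == h)) := by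
          conv_lhs => rw [← ht]
          rw [List.count_append, hv1, Nat.zero_add]
        simp [List.count_cons, hv0]
        exact fun hh => hvne hh.symm
      have hsetperm : (PySem.Set.ofList (h :: t)).Perm
          (h :: PySem.Set.ofList (t.dropWhile (· == h))) := by
        rw [List.perm_ext_iff_of_nodup (PySem.Set.nodup_ofList _)
            (List.nodup_cons.mpr ⟨fun hc => h2 ((PySem.Set.mem_ofList _ _).mp hc),
              PySem.Set.nodup_ofList _⟩)]
        intro a
        constructor
        · intro ha
          rcases List.mem_cons.mp ((PySem.Set.mem_ofList _ _).mp ha) with hcase | hcase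
          · exact List.mem_cons.mpr (Or.inl hcase)
          · rw [← ht] at hcase
            rcases List.mem_append.mp hcase with hcase | hcase
            · exact List.mem_cons.mpr (Or.inl (h1 a hcase))
            · exact List.mem_cons.mpr (Or.inr ((PySem.Set.mem_ofList _ _).mpr hcase))
        · intro ha
          apply (PySem.Set.mem_ofList _ _).mpr
          rcases List.mem_cons.mp ha with hcase | hcase
          · exact hcase ▸ List.mem_cons_self
          · have : a ∈ t := List.Sublist.mem ((PySem.Set.mem_ofList _ _).mp hcase)
              (List.dropWhile_sublist _)
            exact List.mem_cons.mpr (Or.inr this)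
      have hlen2 : (t.dropWhile (· == h)).length ≤ n := by
        have := List.length_dropWhile_le (· == h) t
        have hlt : t.length ≤ n := by simpa using hl
        omega
      rw [runScan, ih _ hlen2 hpt2,
          (hsetperm.map (fun v => tripsOfRun ((h :: t).count v : Int))).sum_eq]
      simp only [List.map_cons, List.sum_cons]
      congr 1
      · rw [hcnth]; push_cast; ring_nf
      · apply congrArg
        apply List.map_congr_left
        intro v hv
        rw [hcntv v hv]

-- ===== VERDICT (by name: the statement is the Claim_ definition above) =====
theorem countTrips_spec : Claim_equal_countTrips := by
  intro xs _
  unfold Spec_countTrips countTrips_alt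
  have hperm : (PySem.List.sorted xs (fun x => x) false).Perm xs := PySem.List.sorted_perm ..
  have hsorted : (PySem.List.sorted xs (fun x => x) false).Pairwise (· ≤ ·) :=
    PySem.List.sorted_pairwise ..
  rw [countTrips_eq_sum, runScan_eq_sum _ _ le_rfl hsorted]
  -- same distinct elements (as a Perm), same counts
  have hofperm : (PySem.Set.ofList xs).Perm (PySem.Set.ofList (PySem.List.sorted xs (fun x => x) false)) := by
    rw [List.perm_ext_iff_of_nodup (PySem.Set.nodup_ofList _) (PySem.Set.nodup_ofList _)]
    intro a
    simp [PySem.Set.mem_ofList, hperm.mem_iff]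
  calc ((PySem.Set.ofList xs).map (fun v => tripsOfRun (xs.count v : Int))).sum
      = ((PySem.Set.ofList (PySem.List.sorted xs (fun x => x) false)).map
          (fun v => tripsOfRun (xs.count v : Int))).sum := (hofperm.map _).sum_eq
    _ = _ := by
        apply congrArg
        apply List.map_congr_left
        intro v _
        rw [hperm.count_eq]
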